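-- pv_equiv track=rewrite | github.com/foxxpy/Codingame-Puzzle-Facile | 023. Disordered First Contact/disordered_first_contact.py | define_list_num_characters
-- ===== SOURCE A (Python) =====
-- def define_list_num_characters(message):
--     sum_j, j = 1, 1
--     list_j = list()
--
--     while sum_j <= len(message):
--         list_j.append(j)
--         j = j + 1
--         sum_j += j
--     list_j.append(len(message) - sum(list_j))
--
--     return list_j
-- ===== SOURCE B (Python) =====
-- import math
--
-- def define_list_num_characters(message):
--     n = len(message)
--     k = (math.isqrt(8 * n + 1) - 1) // 2
--     return list(range(1, k + 1)) + [n - k * (k + 1) // 2]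
-- ===== Notes on version B (the rewrite author's own statement) =====
-- stated objective: simpler
-- what changed: Replaces the accumulate-and-test while loop by a closed-form computation: k = (isqrt(8n+1)-1)//2 is the largest k with k(k+1)/2 <= n, and the result is range(1,k+1) plus the remainder n - k(k+1)//2.
import Mathlib
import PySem

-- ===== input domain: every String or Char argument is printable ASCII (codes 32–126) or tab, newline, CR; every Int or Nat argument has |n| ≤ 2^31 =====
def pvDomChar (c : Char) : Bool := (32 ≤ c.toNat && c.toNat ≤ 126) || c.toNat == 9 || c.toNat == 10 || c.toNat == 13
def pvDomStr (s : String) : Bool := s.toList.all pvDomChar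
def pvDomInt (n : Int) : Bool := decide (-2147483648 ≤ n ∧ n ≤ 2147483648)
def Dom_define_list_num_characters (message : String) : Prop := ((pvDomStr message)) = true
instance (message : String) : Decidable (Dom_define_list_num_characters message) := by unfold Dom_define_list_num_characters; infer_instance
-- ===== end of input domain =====

-- B replaces A's accumulate-and-test while loop by a closed-form integer-sqrt computation
-- of the group count; objective: simpler.

-- ===== PORT A =====
-- the while loop: while sum_j ≤ len(message): list_j.append(j); j += 1; sum_j += j
def pvLoopA (n sum_j j : Nat) : List Int :=
  if sum_j ≤ n then (j : Int) :: pvLoopA n (sum_j + (j + 1)) (j + 1) else []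
termination_by n + 1 - sum_j
decreasing_by omega

def define_list_num_characters (message : String) : List Int :=
  let list_j := pvLoopA message.toList.length 1 1
  list_j ++ [(message.toList.length : Int) - list_j.sum]

-- ===== PORT B =====
-- math.isqrt is ported as Nat.sqrt (exact integer square root)
def define_list_num_characters_alt (message : String) : List Int :=
  let n := message.toList.length
  let k := (Nat.sqrt (8 * n + 1) - 1) / 2
  (List.range k).map (fun i => Int.ofNat i + 1) ++ [(n : Int) - ((k * (k + 1) / 2 : Nat) : Int)]

-- ===== PRECONDITION & SPEC =====
def Spec_define_list_num_characters (message : String) (out : List Int) : Prop := out = define_list_num_characters_alt message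
instance (message : String) (out : List Int) : Decidable (Spec_define_list_num_characters message out) := by unfold Spec_define_list_num_characters; infer_instance

-- ===== CLAIM (what is proved, stated in full; the proofs are below) =====
def Claim_equal_define_list_num_characters : Prop := ∀ (message : String), Dom_define_list_num_characters message → Spec_define_list_num_characters message (define_list_num_characters message)

-- ===== LEMMAS AND PROOFS =====

-- triangular-number step: T (j+1) = T j + (j+1)
theorem pvTriSucc (j : Nat) : (j + 1) * (j + 2) / 2 = j * (j + 1) / 2 + (j + 1) := by
  have h : (j + 1) * (j + 2) = j * (j + 1) + (j + 1) * 2 := by ring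
  rw [h, Nat.add_mul_div_right _ _ (by norm_num : 0 < 2)]

theorem pvTriMono {j k : Nat} (h : j ≤ k) : j * (j + 1) / 2 ≤ k * (k + 1) / 2 :=
  Nat.div_le_div_right (Nat.mul_le_mul h (by omega))

-- k = (isqrt(8n+1)-1)/2 is the largest k with k(k+1)/2 ≤ n
theorem pvK_le (n : Nat) : ((Nat.sqrt (8 * n + 1) - 1) / 2) * ((Nat.sqrt (8 * n + 1) - 1) / 2 + 1) / 2 ≤ n := by
  set s := Nat.sqrt (8 * n + 1) with hs
  set k := (s - 1) / 2 with hk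
  have hs1 : 1 ≤ s := by
    have := Nat.sqrt_le_sqrt (show 1 ≤ 8 * n + 1 by omega)
    simpa [hs] using this
  have hss : s * s ≤ 8 * n + 1 := by
    have := Nat.sqrt_le' (8 * n + 1)
    nlinarith [this]
  have h2k : 2 * k + 1 ≤ s ∧ s ≤ 2 * k + 2 := by omega
  have h4 : 4 * (k * (k + 1)) ≤ 8 * n := by nlinarith [h2k.1, h2k.2, hss]
  have : k * (k + 1) ≤ 2 * n := by omega
  calc k * (k + 1) / 2 ≤ 2 * n / 2 := Nat.div_le_div_right this
    _ = n := by omega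

theorem pvK_lt (n : Nat) : n < ((Nat.sqrt (8 * n + 1) - 1) / 2 + 1) * ((Nat.sqrt (8 * n + 1) - 1) / 2 + 2) / 2 := by
  set s := Nat.sqrt (8 * n + 1) with hs
  set k := (s - 1) / 2 with hk
  have hlt : 8 * n + 1 < (s + 1) * (s + 1) := by
    have := Nat.lt_succ_sqrt' (8 * n + 1)
    nlinarith [this]
  have h2k : s ≤ 2 * k + 2 := by omega
  have h4 : 8 * n + 1 < (2 * k + 3) * (2 * k + 3) := by nlinarith [hlt, h2k]
  have h2 : 2 * n + 1 ≤ (k + 1) * (k + 2) := by nlinarith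
  obtain ⟨m, hm⟩ := Nat.even_mul_succ_self (k + 1)
  have hq : (k + 1) * (k + 2) = (k + 1) * (k + 1 + 1) := by ring
  omega

-- T j ≤ n ↔ j ≤ k
theorem pvTri_le_iff (n j : Nat) :
    j * (j + 1) / 2 ≤ n ↔ j ≤ (Nat.sqrt (8 * n + 1) - 1) / 2 := by
  set k := (Nat.sqrt (8 * n + 1) - 1) / 2 with hk
  constructor
  · intro h
    by_contra hc
    have hj : k + 1 ≤ j := by omega
    have h1 := pvTriMono hj
    have h2 := pvK_lt n
    rw [← hk] at h2
    have hq : (k + 1) * (k + 1 + 1) = (k + 1) * (k + 2) := by ring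
    omega
  · intro h
    exact le_trans (pvTriMono h) (pvK_le n)

-- the while loop, started at j with sum_j = T j, yields [j, j+1, …, k]
theorem pvLoopA_eq (n : Nat) : ∀ (m j : Nat),
    (Nat.sqrt (8 * n + 1) - 1) / 2 + 1 - j = m →
    pvLoopA n (j * (j + 1) / 2) j = (List.range' j m).map Int.ofNat := by
  intro m
  induction m with
  | zero =>
    intro j hm
    have : ¬ j * (j + 1) / 2 ≤ n := by
      rw [pvTri_le_iff]; omega
    rw [pvLoopA]
    simp [this]
  | succ m ih =>
    intro j hm
    have hle : j * (j + 1) / 2 ≤ n := by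
      rw [pvTri_le_iff]; omega
    rw [pvLoopA]
    simp only [hle, if_true]
    have hstep : j * (j + 1) / 2 + (j + 1) = (j + 1) * (j + 1 + 1) / 2 := by
      have h1 := pvTriSucc j
      have hq : (j + 1) * (j + 2) = (j + 1) * (j + 1 + 1) := by ring
      omega
    rw [hstep, ih (j + 1) (by omega), List.range'_succ]
    simp

-- sum of [1, …, k] is T k
theorem pvSumRange' (k : Nat) :
    (((List.range' 1 k).map Int.ofNat).sum) = ((k * (k + 1) / 2 : Nat) : Int) := by
  induction k with
  | zero => simp
  | succ k ih =>
    rw [List.range'_1_concat, List.map_append, List.sum_append, ih]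
    have h2 : (k + 1) * (k + 1 + 1) / 2 = k * (k + 1) / 2 + (k + 1) := by
      have h1 := pvTriSucc k
      have hq : (k + 1) * (k + 2) = (k + 1) * (k + 1 + 1) := by ring
      omega
    rw [h2]
    push_cast
    simp
    ring

theorem pvRangeShape (k : Nat) :
    (List.range k).map (fun i => Int.ofNat i + 1) = (List.range' 1 k).map Int.ofNat := by
  rw [List.range'_eq_map_range]
  simp only [List.map_map]
  apply List.map_congr_left
  intro a _
  simp only [Function.comp, Int.ofNat_eq_natCast]
  push_cast
  ring

-- ===== VERDICT (by name: the statement is the Claim_ definition above) =====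
theorem define_list_num_characters_spec : Claim_equal_define_list_num_characters := by
  intro message _
  show pvLoopA message.toList.length 1 1 ++
      [(message.toList.length : Int) - (pvLoopA message.toList.length 1 1).sum] =
    (List.range ((Nat.sqrt (8 * message.toList.length + 1) - 1) / 2)).map (fun i => Int.ofNat i + 1) ++
      [(message.toList.length : Int) -
        ((((Nat.sqrt (8 * message.toList.length + 1) - 1) / 2) *
          ((Nat.sqrt (8 * message.toList.length + 1) - 1) / 2 + 1) / 2 : Nat) : Int)]
  set n := message.toList.length with hn
  set k := (Nat.sqrt (8 * n + 1) - 1) / 2 with hk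
  have hL : pvLoopA n 1 1 = (List.range' 1 k).map Int.ofNat := by
    have h := pvLoopA_eq n k 1 (by omega)
    have h1 : (1 * (1 + 1) / 2 : Nat) = 1 := by norm_num
    rwa [h1] at h
  rw [hL, pvRangeShape, pvSumRange']
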